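-- pv_equiv track=rewrite | github.com/anry09/codewars | Street Fighter 2 - Character Selection.py | street_fighter_selection
-- ===== SOURCE A (Python) =====
-- def street_fighter_selection(fighters, initial_position, moves):
--     ls = []
--     pos = list(initial_position)
--     for ind, ele in enumerate(moves):
--
--         #"up" comand rule
--         if ele == "up":
--             if pos[0] == 1:
--                 pos[0]-=1
--                 ls.append(fighters[pos[0]][pos[1]])
--             elif pos[0]==0:
--                 pos[0]-=0
--                 ls.append(fighters[pos[0]][pos[1]])
--
--         #"down" comand rule
--         elif ele == "down":
--             if pos[0] == 0:
--                 pos[0] += 1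
--                 ls.append(fighters[pos[0]][pos[1]])
--             elif pos[0] == 1:
--                 pos[0]-=0
--                 ls.append(fighters[pos[0]][pos[1]])
--
--         #"right" comand rule
--         elif ele == "right":
--             pos[1]+=1
--             if pos[1]==len(fighters[pos[0]]):
--                 pos[1]=0
--                 ls.append(fighters[pos[0]][0])
--
--             else:
--                 ls.append(fighters[pos[0]][pos[1]])
--
--         #"left" comand rule
--         elif ele == "left":
--             pos[1]-=1
--             if pos[1]<0:
--                 pos[1]=len(fighters[pos[0]])-1
--                 ls.append(fighters[pos[0]][pos[1]])
--             else:
--                 ls.append(fighters[pos[0]][pos[1]])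
--     return ls
-- ===== SOURCE B (Python) =====
-- def street_fighter_selection(fighters, initial_position, moves):
--     ms = [m for m in moves if m in ("up", "down", "left", "right")]
--     # pass 1: row after each recognized move (two rows: "up" lands on row 0, "down" on row 1)
--     rows, r = [], initial_position[0]
--     for m in ms:
--         r = 0 if m == "up" else 1 if m == "down" else r
--         rows.append(r)
--     # pass 2: cumulative horizontal shift after each recognized move
--     shifts, s = [], 0
--     for m in ms:
--         s += (m == "right") - (m == "left")
--         shifts.append(s)
--     # pass 3: look up each visited cell; the column is the start column plus the
--     # accumulated shift, wrapped modulo the row width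
--     return [fighters[r][(initial_position[1] + s) % len(fighters[r])]
--             for r, s in zip(rows, shifts)]
-- ===== Notes on version B (the rewrite author's own statement) =====
-- stated objective: alternative
-- what changed: Replaces A's single branchy cursor-simulation loop by three staged passes: filter the recognized moves, scan out the row after each move ('up' lands on row 0, 'down' on row 1), scan out the cumulative horizontal shift, then index each visited cell in one final comprehension with the column obtained in closed form as (start column + accumulated shift) mod row width.
-- outside the precondition, e.g. on street_fighter_selection([['A'], ['B'], ['C']], (2, 0), ['up']): A returns [], B returns ['A']; on street_fighter_selection([['a', 'b'], ['c', 'd']], (0, -1), ['left']): A returns ['b'], B returns ['a']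
import Mathlib
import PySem

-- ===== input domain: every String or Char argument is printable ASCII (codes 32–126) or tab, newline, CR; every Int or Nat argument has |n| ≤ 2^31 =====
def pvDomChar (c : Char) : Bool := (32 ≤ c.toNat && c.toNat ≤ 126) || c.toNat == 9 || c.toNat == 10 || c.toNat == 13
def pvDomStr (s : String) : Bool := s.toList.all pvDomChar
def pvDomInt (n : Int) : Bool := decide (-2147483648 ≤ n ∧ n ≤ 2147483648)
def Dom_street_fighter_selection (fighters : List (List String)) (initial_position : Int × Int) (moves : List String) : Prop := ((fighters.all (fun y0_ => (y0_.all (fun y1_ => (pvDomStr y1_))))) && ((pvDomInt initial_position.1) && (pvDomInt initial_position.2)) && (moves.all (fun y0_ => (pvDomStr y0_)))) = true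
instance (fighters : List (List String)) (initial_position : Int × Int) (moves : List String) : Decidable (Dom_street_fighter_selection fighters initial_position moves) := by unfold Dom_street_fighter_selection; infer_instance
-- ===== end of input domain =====

-- B replaces A's single branchy cursor loop by staged passes: filter recognized moves,
-- scan rows, scan cumulative horizontal shifts, then index cells with a closed-form
-- modulo column (objective: alternative).


-- ===== PORT A =====
-- fighters[r] with Python index semantics (default [] only reachable outside Pre_)
def sfsRow (fighters : List (List String)) (r : Int) : List String :=
  (PySem.List.pyGet? fighters r).getD []
-- fighters[r][c] with Python index semantics (default "" only reachable outside Pre_)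
def sfsCell (fighters : List (List String)) (r c : Int) : String :=
  (PySem.List.pyGet? (sfsRow fighters r) c).getD ""

-- the loop of A: state pos = (r, c); branches in A's order
def sfs_goA (fighters : List (List String)) : List String → Int → Int → List String
  | [], _, _ => []
  | m :: rest, r, c =>
    if m == "up" then
      if r == 1 then sfsCell fighters (r - 1) c :: sfs_goA fighters rest (r - 1) c
      else if r == 0 then sfsCell fighters r c :: sfs_goA fighters rest r c
      else sfs_goA fighters rest r c
    else if m == "down" then
      if r == 0 then sfsCell fighters (r + 1) c :: sfs_goA fighters rest (r + 1) c
      else if r == 1 then sfsCell fighters r c :: sfs_goA fighters rest r c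
      else sfs_goA fighters rest r c
    else if m == "right" then
      if c + 1 == ((sfsRow fighters r).length : Int) then
        sfsCell fighters r 0 :: sfs_goA fighters rest r 0
      else sfsCell fighters r (c + 1) :: sfs_goA fighters rest r (c + 1)
    else if m == "left" then
      if c - 1 < 0 then
        sfsCell fighters r (((sfsRow fighters r).length : Int) - 1) ::
          sfs_goA fighters rest r (((sfsRow fighters r).length : Int) - 1)
      else sfsCell fighters r (c - 1) :: sfs_goA fighters rest r (c - 1)
    else sfs_goA fighters rest r c

def street_fighter_selection (fighters : List (List String)) (initial_position : Int × Int) (moves : List String) : List String :=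
  sfs_goA fighters moves initial_position.1 initial_position.2

-- ===== PORT B =====
-- pass 0 of B: keep only the recognized moves
def sfsRecog (moves : List String) : List String :=
  moves.filter (fun m => m == "up" || m == "down" || m == "left" || m == "right")

-- pass 1 of B: row after each recognized move ("up" lands on row 0, "down" on row 1)
def sfsRowsScan (r : Int) : List String → List Int
  | [] => []
  | m :: rest =>
    let r' := if m == "up" then 0 else if m == "down" then 1 else r
    r' :: sfsRowsScan r' rest

-- pass 2 of B: cumulative horizontal shift after each recognized move
def sfsShiftsScan (s : Int) : List String → List Int
  | [] => []
  | m :: rest =>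
    let s' := s + ((if m == "right" then (1 : Int) else 0) - (if m == "left" then (1 : Int) else 0))
    s' :: sfsShiftsScan s' rest

def street_fighter_selection_alt (fighters : List (List String)) (initial_position : Int × Int) (moves : List String) : List String :=
  let ms := sfsRecog moves
  List.zipWith
    (fun r s =>
      sfsCell fighters r (PySem.Int.mod (initial_position.2 + s) ((sfsRow fighters r).length : Int)))
    (sfsRowsScan initial_position.1 ms) (sfsShiftsScan 0 ms)

-- ===== PRECONDITION & SPEC =====
-- Pre_ admits any input whose moves contain no recognized direction (both return []), and
-- otherwise restricts to the kata's grid — rows 0 and 1 nonempty and of equal length with a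
-- start inside them; outside that, A may raise IndexError, wrap a negative index, or (row
-- index outside {0,1}) silently skip up/down moves, accidents of A's implementation.
def Pre_street_fighter_selection (fighters : List (List String)) (initial_position : Int × Int) (moves : List String) : Prop :=
  (∀ m ∈ moves, m ≠ "up" ∧ m ≠ "down" ∧ m ≠ "left" ∧ m ≠ "right") ∨
  (2 ≤ fighters.length ∧
   (fighters.getD 0 []).length = (fighters.getD 1 []).length ∧
   fighters.getD 0 [] ≠ [] ∧
   (initial_position.1 = 0 ∨ initial_position.1 = 1) ∧
   0 ≤ initial_position.2 ∧ initial_position.2 < ((fighters.getD 0 []).length : Int))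
instance (fighters : List (List String)) (initial_position : Int × Int) (moves : List String) : Decidable (Pre_street_fighter_selection fighters initial_position moves) := by unfold Pre_street_fighter_selection; infer_instance

def pvWitness_street_fighter_selection : List (List String) × (Int × Int) × List String :=
  ([["Ryu", "Ken"], ["Balrog", "Vega"]], (0, 0), ["right", "down", "left", "up"])

def Spec_street_fighter_selection (fighters : List (List String)) (initial_position : Int × Int) (moves : List String) (out : List String) : Prop := out = street_fighter_selection_alt fighters initial_position moves
instance (fighters : List (List String)) (initial_position : Int × Int) (moves : List String) (out : List String) : Decidable (Spec_street_fighter_selection fighters initial_position moves out) := by unfold Spec_street_fighter_selection; infer_instance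

-- ===== CLAIM (what is proved, stated in full; the proofs are below) =====
def Claim_equal_street_fighter_selection : Prop := ∀ (fighters : List (List String)) (initial_position : Int × Int) (moves : List String), Dom_street_fighter_selection fighters initial_position moves → Pre_street_fighter_selection fighters initial_position moves → Spec_street_fighter_selection fighters initial_position moves (street_fighter_selection fighters initial_position moves)

-- ===== LEMMAS AND PROOFS =====

lemma sfs_mod_id {c L : Int} (h0 : 0 ≤ c) (h1 : c < L) : PySem.Int.mod c L = c := by
  rw [PySem.Int.mod_eq_emod_of_pos (by omega)]; exact Int.emod_eq_of_lt h0 h1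

lemma sfs_skip (fighters : List (List String)) (moves : List String)
    (h : ∀ m ∈ moves, m ≠ "up" ∧ m ≠ "down" ∧ m ≠ "left" ∧ m ≠ "right") :
    ∀ r c : Int, sfs_goA fighters moves r c = [] ∧ sfsRecog moves = [] := by
  induction moves with
  | nil => intro r c; exact ⟨rfl, rfl⟩
  | cons m rest ih =>
    intro r c
    obtain ⟨hup, hdown, hleft, hright⟩ := h m (List.mem_cons_self ..)
    have ih' := ih (fun x hx => h x (List.mem_cons_of_mem _ hx))
    constructor
    · show (if (m == "up") = true then _ else _) = _
      rw [if_neg (by simpa using hup), if_neg (by simpa using hdown),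
          if_neg (by simpa using hright), if_neg (by simpa using hleft)]
      exact (ih' r c).1
    · simp only [sfsRecog, List.filter_cons]
      rw [if_neg (by simp [hup, hdown, hleft, hright])]
      exact (ih' r c).2

-- main invariant: A's cursor (r, c) matches B's staged pipeline from the recognized suffix,
-- where c = (c0 + s) mod W for B's accumulated shift s
lemma sfs_go_eq (a b : List String) (t : List (List String)) (hlen : a.length = b.length)
    (hne : a ≠ []) (c0 : Int) (moves : List String) :
    ∀ (r c s : Int), (r = 0 ∨ r = 1) → 0 ≤ c → c < (a.length : Int) →
    PySem.Int.mod (c0 + s) (a.length : Int) = c →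
    sfs_goA (a :: b :: t) moves r c =
      List.zipWith
        (fun r' s' =>
          sfsCell (a :: b :: t) r'
            (PySem.Int.mod (c0 + s') ((sfsRow (a :: b :: t) r').length : Int)))
        (sfsRowsScan r (sfsRecog moves)) (sfsShiftsScan s (sfsRecog moves)) := by
  have hL : 0 < (a.length : Int) := by
    cases a with
    | nil => exact absurd rfl hne
    | cons x xs => simp
  have hrow0 : sfsRow (a :: b :: t) 0 = a := by
    simp [sfsRow, PySem.List.pyGet?_zero]
  have hrow1 : sfsRow (a :: b :: t) 1 = b := by
    simp only [sfsRow, show (1 : Int) = ((1 : Nat) : Int) from rfl, PySem.List.pyGet?_natCast]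
    rfl
  have hWr : ∀ r : Int, r = 0 ∨ r = 1 → ((sfsRow (a :: b :: t) r).length : Int) = (a.length : Int) := by
    rintro r (rfl | rfl)
    · rw [hrow0]
    · rw [hrow1]; exact_mod_cast hlen.symm
  induction moves with
  | nil => intro r c s _ _ _ _; rfl
  | cons m rest ih =>
    intro r c s hr hc0 hc1 hcs
    -- decompose the invariant: c0 + s = c + W * q
    obtain ⟨q, hq⟩ : ∃ q : Int, c0 + s = c + (a.length : Int) * q := by
      refine ⟨PySem.Int.floordiv (c0 + s) (a.length : Int), ?_⟩
      have := PySem.Int.floordiv_mul_add_mod (c0 + s) (a.length : Int)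
      rw [hcs] at this; linarith
    have hmodc : ∀ d : Int, 0 ≤ c + d → c + d < (a.length : Int) →
        PySem.Int.mod (c0 + (s + d)) (a.length : Int) = c + d := by
      intro d h0 h1
      rw [PySem.Int.mod_eq_emod_of_pos hL,
          show c0 + (s + d) = (c + d) + (a.length : Int) * q by linarith,
          Int.add_mul_emod_self_left]
      exact Int.emod_eq_of_lt h0 h1
    by_cases hup : m = "up"
    · subst hup
      have hrec : sfsRecog ("up" :: rest) = "up" :: sfsRecog rest := by
        simp [sfsRecog]
      rcases hr with rfl | rfl
      · show sfsCell (a :: b :: t) 0 c :: sfs_goA (a :: b :: t) rest 0 c = _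
        rw [hrec]
        simp only [sfsRowsScan, sfsShiftsScan, String.reduceBEq, Bool.false_eq_true, if_false,
                   if_true, sub_self, add_zero, List.zipWith_cons_cons]
        rw [hWr 0 (Or.inl rfl), hcs]
        exact congrArg _ (ih 0 c s (Or.inl rfl) hc0 hc1 hcs)
      · show sfsCell (a :: b :: t) (1 - 1) c :: sfs_goA (a :: b :: t) rest (1 - 1) c = _
        rw [hrec]
        simp only [sfsRowsScan, sfsShiftsScan, String.reduceBEq, Bool.false_eq_true, if_false,
                   if_true, sub_self, add_zero, List.zipWith_cons_cons]
        rw [hWr 0 (Or.inl rfl), hcs]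
        norm_num
        exact ih 0 c s (Or.inl rfl) hc0 hc1 hcs
    · by_cases hdown : m = "down"
      · subst hdown
        have hrec : sfsRecog ("down" :: rest) = "down" :: sfsRecog rest := by
          simp [sfsRecog]
        rcases hr with rfl | rfl
        · show sfsCell (a :: b :: t) (0 + 1) c :: sfs_goA (a :: b :: t) rest (0 + 1) c = _
          rw [hrec]
          simp only [sfsRowsScan, sfsShiftsScan, String.reduceBEq, Bool.false_eq_true, if_false,
                     if_true, sub_self, add_zero, List.zipWith_cons_cons]
          rw [hWr 1 (Or.inr rfl), hcs]
          norm_num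
          exact ih 1 c s (Or.inr rfl) hc0 hc1 hcs
        · show sfsCell (a :: b :: t) 1 c :: sfs_goA (a :: b :: t) rest 1 c = _
          rw [hrec]
          simp only [sfsRowsScan, sfsShiftsScan, String.reduceBEq, Bool.false_eq_true, if_false,
                     if_true, sub_self, add_zero, List.zipWith_cons_cons]
          rw [hWr 1 (Or.inr rfl), hcs]
          exact congrArg _ (ih 1 c s (Or.inr rfl) hc0 hc1 hcs)
      · by_cases hright : m = "right"
        · subst hright
          have hrec : sfsRecog ("right" :: rest) = "right" :: sfsRecog rest := by
            simp [sfsRecog]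
          simp only [sfs_goA, beq_iff_eq]
          rw [if_neg (by decide : ¬ (("right" : String) = "up")),
              if_neg (by decide : ¬ (("right" : String) = "down")), hrec]
          simp only [sfsRowsScan, sfsShiftsScan, String.reduceBEq, Bool.false_eq_true, if_false,
                     if_true, sub_zero, List.zipWith_cons_cons]
          rw [hWr r hr]
          by_cases hE : c + 1 = (a.length : Int)
          · have hm : PySem.Int.mod (c0 + (s + 1)) (a.length : Int) = 0 := by
              rw [PySem.Int.mod_eq_emod_of_pos hL,
                  show c0 + (s + 1) = 0 + (a.length : Int) * (q + 1) by linarith,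
                  Int.add_mul_emod_self_left]
              exact Int.zero_emod _
            rw [hm, if_pos (by exact_mod_cast hE)]
            exact congrArg _ (ih r 0 (s + 1) hr le_rfl hL hm)
          · have hm : PySem.Int.mod (c0 + (s + 1)) (a.length : Int) = c + 1 :=
              hmodc 1 (by omega) (by omega)
            rw [hm, if_neg (by exact_mod_cast hE)]
            exact congrArg _ (ih r (c + 1) (s + 1) hr (by omega) (by omega) hm)
        · by_cases hleft : m = "left"
          · subst hleft
            have hrec : sfsRecog ("left" :: rest) = "left" :: sfsRecog rest := by
              simp [sfsRecog]
            simp only [sfs_goA, beq_iff_eq]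
            rw [if_neg (by decide : ¬ (("left" : String) = "up")),
                if_neg (by decide : ¬ (("left" : String) = "down")),
                if_neg (by decide : ¬ (("left" : String) = "right")), hrec]
            simp only [sfsRowsScan, sfsShiftsScan, String.reduceBEq, Bool.false_eq_true, if_false,
                       if_true, zero_sub, List.zipWith_cons_cons]
            rw [hWr r hr]
            by_cases hE : c - 1 < 0
            · have hm : PySem.Int.mod (c0 + (s + -1)) (a.length : Int) = (a.length : Int) - 1 := by
                rw [PySem.Int.mod_eq_emod_of_pos hL,
                    show c0 + (s + -1) = ((a.length : Int) - 1) + (a.length : Int) * (q - 1) by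
                       linarith [show c = 0 by omega],
                    Int.add_mul_emod_self_left]
                exact Int.emod_eq_of_lt (by omega) (by omega)
              rw [hm, if_pos hE]
              exact congrArg _ (ih r ((a.length : Int) - 1) (s + -1) hr (by omega) (by omega) hm)
            · have hm : PySem.Int.mod (c0 + (s + -1)) (a.length : Int) = c - 1 := by
                have := hmodc (-1) (by omega) (by omega)
                simpa using this
              rw [hm, if_neg hE]
              exact congrArg _ (ih r (c - 1) (s + -1) hr (by omega) (by omega) hm)
          · -- unrecognized move: A skips it, B's filter drops it
            have hrec : sfsRecog (m :: rest) = sfsRecog rest := by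
              simp only [sfsRecog, List.filter_cons]
              rw [if_neg (by simp [hup, hdown, hleft, hright])]
            simp only [sfs_goA]
            rw [if_neg (by simpa using hup), if_neg (by simpa using hdown),
                if_neg (by simpa using hright), if_neg (by simpa using hleft), hrec]
            exact ih r c s hr hc0 hc1 hcs

-- ===== VERDICT (by name: the statement is the Claim_ definition above) =====
theorem street_fighter_selection_spec : Claim_equal_street_fighter_selection := by
  intro fighters ip moves _ hpre
  unfold Spec_street_fighter_selection street_fighter_selection street_fighter_selection_alt
  unfold Pre_street_fighter_selection at hpre
  rcases hpre with hskip | hgrid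
  · obtain ⟨hA, hB⟩ := sfs_skip fighters moves hskip ip.1 ip.2
    rw [hA, hB]
    rfl
  · obtain ⟨h2, hlen, hne, hr, hc0, hc1⟩ := hgrid
    match fighters, h2 with
    | (a :: b :: t), _ =>
      have hlen' : a.length = b.length := by simpa using hlen
      have hne' : a ≠ [] := by simpa using hne
      have hc1' : ip.2 < (a.length : Int) := by simpa using hc1
      have hcs : PySem.Int.mod (ip.2 + 0) (a.length : Int) = ip.2 := by
        simpa using sfs_mod_id hc0 hc1'
      exact sfs_go_eq a b t hlen' hne' ip.2 moves ip.1 ip.2 0 hr hc0 hc1' hcs
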